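-- pv_equiv track=rewrite | github.com/IA-para-DEVs-SD/grupo-2-semantic-log-explorer | backend/tests/property/test_spa_fallback_prop.py | _find_matching_block
-- ===== SOURCE A (Python) =====
-- def _find_matching_block(
--     blocks: list[tuple[str, str]], path: str
-- ) -> tuple[str, str] | None:
--     """Return the most specific location block that matches *path*."""
--     best: tuple[str, str] | None = None
--     best_len = -1
--     for pattern, body in blocks:
--         if path.startswith(pattern) and len(pattern) > best_len:
--             best = (pattern, body)
--             best_len = len(pattern)
--     return best
-- ===== SOURCE B (Python) =====
-- def _find_matching_block(blocks, path):
--     """Two-pass: find the maximal matching-prefix length, then return the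
--     first block achieving it (same first-wins tie behaviour as the original)."""
--     lens = [len(pattern) for pattern, _ in blocks if path.startswith(pattern)]
--     if not lens:
--         return None
--     m = max(lens)
--     for block in blocks:
--         if len(block[0]) == m and path.startswith(block[0]):
--             return block
-- ===== Notes on version B (the rewrite author's own statement) =====
-- stated objective: alternative
-- what changed: Replaces the single scan-keep-best loop (mutable best/best_len state) with a stateless two-pass scheme: first compute the maximum matching-prefix length, then return the first block attaining it.
import Mathlib
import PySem

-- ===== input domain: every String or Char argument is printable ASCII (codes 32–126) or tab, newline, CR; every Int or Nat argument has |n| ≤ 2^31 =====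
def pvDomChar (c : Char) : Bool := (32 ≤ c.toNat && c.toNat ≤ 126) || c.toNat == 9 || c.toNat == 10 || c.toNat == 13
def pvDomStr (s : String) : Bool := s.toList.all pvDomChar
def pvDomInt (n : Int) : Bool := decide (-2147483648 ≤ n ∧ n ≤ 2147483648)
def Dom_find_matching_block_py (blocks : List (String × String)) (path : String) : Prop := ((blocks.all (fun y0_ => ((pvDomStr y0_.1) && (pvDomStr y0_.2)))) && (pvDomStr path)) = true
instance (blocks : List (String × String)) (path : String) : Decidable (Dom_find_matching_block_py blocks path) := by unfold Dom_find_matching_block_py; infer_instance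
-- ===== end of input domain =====

-- B replaces A's scan-keep-best loop by a two-pass scheme (max matching length, then first block attaining it); alternative structure, same cost.


-- ===== PORT A =====
-- scan all blocks, keeping the matching block with the strictly greatest pattern length
def find_matching_block_py (blocks : List (String × String)) (path : String) : Option (String × String) :=
  (blocks.foldl
    (fun (st : Option (String × String) × Int) b =>
      if PySem.Str.startswith path b.1 && decide (st.2 < PySem.Str.len b.1)
      then (some b, PySem.Str.len b.1) else st)
    (none, -1)).1

-- ===== PORT B =====
-- pass 1: lengths of the matching patterns, max (PySem.List.max? = none is Source B's 'if not lens' empty check);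
-- pass 2: first block whose pattern has that maximal length and matches
def find_matching_block_py_alt (blocks : List (String × String)) (path : String) : Option (String × String) :=
  match PySem.List.max?
      ((blocks.filter (fun b => PySem.Str.startswith path b.1)).map (fun b => PySem.Str.len b.1))
      (fun x => x) with
  | none => none
  | some m => blocks.find? (fun b => PySem.Str.len b.1 == m && PySem.Str.startswith path b.1)

-- ===== PRECONDITION & SPEC =====
def Spec_find_matching_block_py (blocks : List (String × String)) (path : String) (out : Option (String × String)) : Prop := out = find_matching_block_py_alt blocks path
instance (blocks : List (String × String)) (path : String) (out : Option (String × String)) : Decidable (Spec_find_matching_block_py blocks path out) := by unfold Spec_find_matching_block_py; infer_instance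

-- ===== CLAIM (what is proved, stated in full; the proofs are below) =====
def Claim_equal_find_matching_block_py : Prop := ∀ (blocks : List (String × String)) (path : String), Dom_find_matching_block_py blocks path → Spec_find_matching_block_py blocks path (find_matching_block_py blocks path)

-- ===== LEMMAS AND PROOFS =====

-- running maximum of L over the P-elements of l, seeded with bl
def pvMF {α : Type} (P : α → Bool) (L : α → Int) (l : List α) (bl : Int) : Int :=
  l.foldl (fun a b => if P b then max a (L b) else a) bl

theorem pvMF_le {α : Type} (P : α → Bool) (L : α → Int) (l : List α) (bl : Int) :
    bl ≤ pvMF P L l bl := by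
  induction l generalizing bl with
  | nil => simp [pvMF]
  | cons x t ih =>
      simp only [pvMF, List.foldl_cons]
      split_ifs with h
      · exact le_trans (le_max_left _ _) (ih (max bl (L x)))
      · exact ih bl

-- characterisation of A's scan-keep-best fold from an arbitrary state
theorem pvA_fold {α : Type} (P : α → Bool) (L : α → Int) (l : List α)
    (best : Option α) (bl : Int) :
    (l.foldl
      (fun (st : Option α × Int) b =>
        if P b && decide (st.2 < L b) then (some b, L b) else st)
      (best, bl)).1 =
    if pvMF P L l bl = bl then best
    else l.find? (fun b => P b && (L b == pvMF P L l bl)) := by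
  induction l generalizing best bl with
  | nil => simp [pvMF]
  | cons x t ih =>
      by_cases hs : P x = true
      · by_cases hlt : bl < L x
        · have hMF : pvMF P L (x :: t) bl = pvMF P L t (L x) := by
            simp [pvMF, hs, max_eq_right (le_of_lt hlt)]
          have hge : L x ≤ pvMF P L (x :: t) bl := hMF ▸ pvMF_le P L t _
          have hne : pvMF P L (x :: t) bl ≠ bl := by omega
          simp only [List.foldl_cons, hs, hlt, decide_true, Bool.and_self, if_true]
          rw [ih (some x) (L x), ← hMF, if_neg hne, List.find?_cons]
          simp only [hs, Bool.true_and]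
          by_cases hx : L x = pvMF P L (x :: t) bl
          · rw [if_pos hx.symm, show (L x == pvMF P L (x :: t) bl) = true from beq_iff_eq.mpr hx]
          · rw [if_neg (fun h => hx h.symm),
              show (L x == pvMF P L (x :: t) bl) = false from beq_eq_false_iff_ne.mpr hx]
        · have hle : L x ≤ bl := le_of_not_gt hlt
          have hMF : pvMF P L (x :: t) bl = pvMF P L t bl := by
            simp [pvMF, hs, max_eq_left hle]
          rw [List.foldl_cons, if_neg (by simp [hlt] : ¬ (P x && decide (bl < L x)) = true)]
          rw [ih best bl, ← hMF]
          by_cases hM : pvMF P L (x :: t) bl = bl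
          · simp [hM]
          · rw [if_neg hM, if_neg hM, List.find?_cons]
            have hx : ¬ (L x = pvMF P L (x :: t) bl) := by
              intro h
              have h1 : bl ≤ pvMF P L (x :: t) bl := hMF ▸ pvMF_le P L t bl
              omega
            rw [show (P x && (L x == pvMF P L (x :: t) bl)) = false from by
              simp [beq_eq_false_iff_ne.mpr hx]]
      · have hMF : pvMF P L (x :: t) bl = pvMF P L t bl := by simp [pvMF, hs]
        rw [List.foldl_cons, if_neg (by simp [hs] : ¬ (P x && decide (bl < L x)) = true)]
        rw [ih best bl, ← hMF]
        by_cases hM : pvMF P L (x :: t) bl = bl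
        · simp [hM]
        · rw [if_neg hM, if_neg hM, List.find?_cons]
          rw [show (P x && (L x == pvMF P L (x :: t) bl)) = false from by
            simp [hs]]

-- pvMF is the fold of max over the mapped-filtered list B builds
theorem pvMF_eq_lens {α : Type} (P : α → Bool) (L : α → Int) (l : List α) (bl : Int) :
    pvMF P L l bl = ((l.filter P).map L).foldl max bl := by
  induction l generalizing bl with
  | nil => simp [pvMF]
  | cons x t ih =>
      by_cases hs : P x = true
      · simp only [pvMF, List.foldl_cons, List.filter_cons, hs, if_true, List.map_cons]
        exact ih (max bl (L x))
      · simp only [pvMF, List.foldl_cons, List.filter_cons, hs, Bool.false_eq_true, if_false]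
        exact ih bl

-- Python max() over a nonempty Int list as a fold
theorem pv_maxq (t : List Int) (c : Int) :
    PySem.List.max? (c :: t) (fun x => x) = some (t.foldl max c) := by
  induction t generalizing c with
  | nil => rfl
  | cons x t ih =>
      have step : PySem.List.max? (c :: x :: t) (fun x => x)
          = PySem.List.max? (max c x :: t) (fun x => x) := by
        simp only [PySem.List.max?, List.foldl_cons]
        rcases le_or_gt x c with h | h
        · rw [max_eq_left h]
          rw [show (if (c:Int) < x then some x else some c) = some c from if_neg (not_lt_of_ge h)]
        · rw [max_eq_right h.le]
          rw [show (if (c:Int) < x then some x else some c) = some x from if_pos h]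
      rw [List.foldl_cons, step, ih (max c x)]

theorem pv_maxq_none {t : List Int} (h : PySem.List.max? t (fun x => x) = none) : t = [] := by
  cases t with
  | nil => rfl
  | cons c t => rw [pv_maxq] at h; exact absurd h (by simp)

theorem pv_lens_nonneg (path : String) (l : List (String × String)) (h : Int)
    (hm : h ∈ (l.filter (fun b => PySem.Str.startswith path b.1)).map (fun b => PySem.Str.len b.1)) :
    0 ≤ h := by
  rcases List.mem_map.mp hm with ⟨b, _, rfl⟩
  rw [PySem.Str.len_eq]
  exact Int.natCast_nonneg _

-- ===== VERDICT (by name: the statement is the Claim_ definition above) =====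
theorem find_matching_block_py_spec : Claim_equal_find_matching_block_py := by
  intro blocks path _
  unfold Spec_find_matching_block_py find_matching_block_py find_matching_block_py_alt
  rw [pvA_fold (fun b => PySem.Str.startswith path b.1) (fun b => PySem.Str.len b.1) blocks none (-1)]
  rcases hmax : PySem.List.max?
      ((blocks.filter (fun b => PySem.Str.startswith path b.1)).map (fun b => PySem.Str.len b.1))
      (fun x => x) with _ | m
  · rw [hmax]
    have hl := pv_maxq_none hmax
    have hM : pvMF (fun b => PySem.Str.startswith path b.1) (fun b => PySem.Str.len b.1) blocks (-1) = -1 := by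
      rw [pvMF_eq_lens, hl]; rfl
    rw [if_pos hM]
  · rw [hmax]
    rcases hl : (blocks.filter (fun b => PySem.Str.startswith path b.1)).map
        (fun b => PySem.Str.len b.1) with _ | ⟨h, t⟩
    · rw [hl] at hmax; exact absurd hmax (by simp [PySem.List.max?])
    · have hh : (0:Int) ≤ h := pv_lens_nonneg path blocks h (by rw [hl]; exact List.mem_cons_self ..)
      have hm : t.foldl max h = m := by
        rw [hl, pv_maxq] at hmax
        injection hmax
      have hM : pvMF (fun b => PySem.Str.startswith path b.1) (fun b => PySem.Str.len b.1) blocks (-1)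
          = t.foldl max h := by
        rw [pvMF_eq_lens, hl, List.foldl_cons, max_eq_right (by omega : (-1:Int) ≤ h)]
      have hge : h ≤ t.foldl max h := (PySem.List.le_foldl_max t h).1
      have hne : pvMF (fun b => PySem.Str.startswith path b.1) (fun b => PySem.Str.len b.1) blocks (-1) ≠ -1 := by
        omega
      rw [if_neg hne]
      congr 1
      funext b
      rw [hM, hm]
      exact Bool.and_comm _ _
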